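-- pv_equiv track=rewrite | github.com/drgfragkos/_tools | genProductKeys.py | validate_license_key
-- ===== SOURCE A (Python) =====
-- def validate_license_key(key):
--     key = key.replace('-', '')
--     if len(key) != 25:
--         return False
--     digits = []
--     for c in key:
--         if c.isdigit():
--             digits.append(int(c))
--         elif c.isalpha():
--             digits.append(ord(c) - ord('A') + 10)
--         else:
--             return False
--     check = sum(digits[::-2] + [sum(divmod(d * 2, 10)) for d in digits[-2::-2]]) % 10
--     return check == 0
-- ===== SOURCE B (Python) =====
-- def validate_license_key(key):
--     key = key.replace('-', '')
--     if len(key) != 25: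
--         return False
--     total = 0
--     double = False
--     for c in key:
--         if c.isdigit():
--             d = int(c)
--         elif c.isalpha():
--             d = ord(c) - ord('A') + 10
--         else:
--             return False
--         if double:
--             q, r = divmod(d * 2, 10)
--             total += q + r
--         else:
--             total += d
--         double = not double
--     return total % 10 == 0
-- ===== Notes on version B (the rewrite author's own statement) =====
-- stated objective: simpler
-- what changed: Replaces A's intermediate digits list plus two strided slice passes (digits[::-2] and a doubled comprehension over digits[-2::-2]) and a concatenated sum with a single forward pass that converts each character and accumulates the checksum with a parity flag, building no lists.
import Mathlib
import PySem

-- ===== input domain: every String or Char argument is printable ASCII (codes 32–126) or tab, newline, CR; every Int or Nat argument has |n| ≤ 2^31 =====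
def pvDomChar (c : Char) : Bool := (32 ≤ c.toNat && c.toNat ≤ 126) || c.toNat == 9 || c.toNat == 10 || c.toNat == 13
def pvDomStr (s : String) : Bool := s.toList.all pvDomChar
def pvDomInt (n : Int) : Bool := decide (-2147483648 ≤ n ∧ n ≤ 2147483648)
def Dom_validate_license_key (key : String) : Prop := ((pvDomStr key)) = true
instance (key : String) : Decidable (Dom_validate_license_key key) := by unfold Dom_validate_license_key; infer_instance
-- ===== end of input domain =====

-- B replaces A's two strided slice passes over a digits list with one accumulating pass
-- (parity branch, no intermediate list); objective: simpler. Return-value equivalence only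
-- (neither program mutates its argument).

-- ===== PORT A =====
-- the char→digit loop of A: some digits list, or none = A's early 'return False' on a non-alnum char
-- int(c) for an ASCII digit char is ord(c) - 48; ord(c) is c.toNat, ord('A') = 65 (exact on the ASCII domain)
def pvDigitsA : List Char → Option (List Int)
  | [] => some []
  | c :: cs =>
    if PySem.Chars.isdigit c then
      (pvDigitsA cs).map (fun ds => ((c.toNat : Int) - 48) :: ds)
    else if PySem.Chars.isalpha c then
      (pvDigitsA cs).map (fun ds => ((c.toNat : Int) - 65 + 10) :: ds)
    else none

def validate_license_key (key : String) : Bool :=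
  let k := PySem.Chars.replace key.toList ['-'] []   -- key.replace('-', '')
  if k.length ≠ 25 then false
  else
    match pvDigitsA k with
    | none => false
    | some digits =>
      -- digits[::-2] and digits[-2::-2]; step -2 ≠ 0, so slice? is always some (getD [] unreachable)
      -- sum(divmod(d*2, 10)) = (d*2)//10 + (d*2)%10
      let check := PySem.Int.mod
        (((PySem.List.slice? digits none none (-2)).getD [] ++
          ((PySem.List.slice? digits (some (-2)) none (-2)).getD []).map
            (fun d => PySem.Int.floordiv (d * 2) 10 + PySem.Int.mod (d * 2) 10)).sum) 10
      check == 0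

-- ===== PORT B =====
-- B's single pass: total accumulator and the 'double' parity flag; returns false on a non-alnum char
def pvLoopB : List Char → Int → Bool → Bool
  | [], total, _ => PySem.Int.mod total 10 == 0
  | c :: cs, total, dbl =>
    match (if PySem.Chars.isdigit c then some ((c.toNat : Int) - 48)
           else if PySem.Chars.isalpha c then some ((c.toNat : Int) - 65 + 10)
           else none : Option Int) with
    | none => false
    | some d =>
      pvLoopB cs
        (total + (if dbl then PySem.Int.floordiv (d * 2) 10 + PySem.Int.mod (d * 2) 10 else d))
        (!dbl)

def validate_license_key_alt (key : String) : Bool :=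
  let k := PySem.Chars.replace key.toList ['-'] []
  if k.length ≠ 25 then false
  else pvLoopB k 0 false

-- ===== PRECONDITION & SPEC =====
def Spec_validate_license_key (key : String) (out : Bool) : Prop := out = validate_license_key_alt key
instance (key : String) (out : Bool) : Decidable (Spec_validate_license_key key out) := by unfold Spec_validate_license_key; infer_instance

-- ===== CLAIM (what is proved, stated in full; the proofs are below) =====
def Claim_equal_validate_license_key : Prop := ∀ (key : String), Dom_validate_license_key key → Spec_validate_license_key key (validate_license_key key)

-- ===== LEMMAS AND PROOFS =====

-- the summand B adds at parity dbl, summed over the rest of the digit list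
def pvPsum : List Int → Bool → Int
  | [], _ => 0
  | d :: ds, dbl =>
    (if dbl then PySem.Int.floordiv (d * 2) 10 + PySem.Int.mod (d * 2) 10 else d) + pvPsum ds (!dbl)

lemma pvLoopB_eq (cs : List Char) : ∀ (total : Int) (dbl : Bool),
    pvLoopB cs total dbl =
      match pvDigitsA cs with
      | none => false
      | some ds => (PySem.Int.mod (total + pvPsum ds dbl) 10 == 0) := by
  induction cs with
  | nil => intro total dbl; simp [pvLoopB, pvDigitsA, pvPsum]
  | cons c cs ih =>
    intro total dbl
    by_cases h1 : PySem.Chars.isdigit c = true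
    · simp [pvLoopB, pvDigitsA, h1, ih]
      cases pvDigitsA cs with
      | none => simp
      | some ds => simp [pvPsum]; ring_nf
    · by_cases h2 : PySem.Chars.isalpha c = true
      · simp [pvLoopB, pvDigitsA, h1, h2, ih]
        cases pvDigitsA cs with
        | none => simp
        | some ds => simp [pvPsum]; ring_nf
      · simp [pvLoopB, pvDigitsA, h1, h2]

lemma pvDigitsA_length (cs : List Char) : ∀ ds, pvDigitsA cs = some ds → ds.length = cs.length := by
  induction cs with
  | nil => intro ds h; simp [pvDigitsA] at h; simp [← h]
  | cons c cs ih =>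
    intro ds h
    by_cases h1 : PySem.Chars.isdigit c = true
    · simp [pvDigitsA, h1] at h
      obtain ⟨ds', hd, rfl⟩ := h
      simp [ih ds' hd]
    · by_cases h2 : PySem.Chars.isalpha c = true
      · simp [pvDigitsA, h1, h2] at h
        obtain ⟨ds', hd, rfl⟩ := h
        simp [ih ds' hd]
      · simp [pvDigitsA, h1, h2] at h

-- A's checksum equals B's interleaved sum on any 25-element digit list
lemma pvCheck_eq (ds : List Int) (h : ds.length = 25) :
    ((PySem.Int.mod
        (((PySem.List.slice? ds none none (-2)).getD [] ++
          ((PySem.List.slice? ds (some (-2)) none (-2)).getD []).map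
            (fun d => PySem.Int.floordiv (d * 2) 10 + PySem.Int.mod (d * 2) 10)).sum) 10 == 0) : Bool) =
      (PySem.Int.mod (0 + pvPsum ds false) 10 == 0) := by
  rcases ds with _ | ⟨d0, ds⟩
  · simp at h
  rcases ds with _ | ⟨d1, ds⟩
  · simp at h
  rcases ds with _ | ⟨d2, ds⟩
  · simp at h
  rcases ds with _ | ⟨d3, ds⟩
  · simp at h
  rcases ds with _ | ⟨d4, ds⟩
  · simp at h
  rcases ds with _ | ⟨d5, ds⟩
  · simp at h
  rcases ds with _ | ⟨d6, ds⟩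
  · simp at h
  rcases ds with _ | ⟨d7, ds⟩
  · simp at h
  rcases ds with _ | ⟨d8, ds⟩
  · simp at h
  rcases ds with _ | ⟨d9, ds⟩
  · simp at h
  rcases ds with _ | ⟨d10, ds⟩
  · simp at h
  rcases ds with _ | ⟨d11, ds⟩
  · simp at h
  rcases ds with _ | ⟨d12, ds⟩
  · simp at h
  rcases ds with _ | ⟨d13, ds⟩
  · simp at h
  rcases ds with _ | ⟨d14, ds⟩
  · simp at h
  rcases ds with _ | ⟨d15, ds⟩
  · simp at h
  rcases ds with _ | ⟨d16, ds⟩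
  · simp at h
  rcases ds with _ | ⟨d17, ds⟩
  · simp at h
  rcases ds with _ | ⟨d18, ds⟩
  · simp at h
  rcases ds with _ | ⟨d19, ds⟩
  · simp at h
  rcases ds with _ | ⟨d20, ds⟩
  · simp at h
  rcases ds with _ | ⟨d21, ds⟩
  · simp at h
  rcases ds with _ | ⟨d22, ds⟩
  · simp at h
  rcases ds with _ | ⟨d23, ds⟩
  · simp at h
  rcases ds with _ | ⟨d24, ds⟩
  · simp at h
  rcases ds with _ | ⟨d25, ds⟩
  · have h1 : (PySem.List.slice? [d0,d1,d2,d3,d4,d5,d6,d7,d8,d9,d10,d11,d12,d13,d14,d15,d16,d17,d18,d19,d20,d21,d22,d23,d24] none none (-2)).getD ([] : List Int) = [d24,d22,d20,d18,d16,d14,d12,d10,d8,d6,d4,d2,d0] := by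
      with_unfolding_all rfl
    have h2 : (PySem.List.slice? [d0,d1,d2,d3,d4,d5,d6,d7,d8,d9,d10,d11,d12,d13,d14,d15,d16,d17,d18,d19,d20,d21,d22,d23,d24] (some (-2)) none (-2)).getD ([] : List Int) = [d23,d21,d19,d17,d15,d13,d11,d9,d7,d5,d3,d1] := by
      with_unfolding_all rfl
    rw [h1, h2]
    simp only [List.map_cons, List.map_nil, List.cons_append, List.nil_append,
      List.sum_cons, List.sum_nil, pvPsum, Bool.not_true, Bool.not_false,
      Bool.false_eq_true, if_true, if_false,
      zero_add, add_zero]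
    congr 1
    congr 1
    ring
  · simp at h

-- ===== VERDICT (by name: the statement is the Claim_ definition above) =====
theorem validate_license_key_spec : Claim_equal_validate_license_key := by
  intro key _
  unfold Spec_validate_license_key validate_license_key validate_license_key_alt
  set k := PySem.Chars.replace key.toList ['-'] [] with hk
  by_cases hlen : k.length = 25
  · simp only [hlen, ne_eq, not_true_eq_false, if_false, pvLoopB_eq]
    cases hd : pvDigitsA k with
    | none => rfl
    | some ds =>
      have : ds.length = 25 := by rw [pvDigitsA_length k ds hd, hlen]
      simpa using pvCheck_eq ds this
  · simp [hlen]
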